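-- pv_equiv track=rewrite | github.com/baidu-baige/LoongForge | loongforge/data/sft_supervised_utils.py | _split_long_sequence
-- ===== SOURCE A (Python) =====
-- from typing import TYPE_CHECKING, Union, Dict, List, Any, Sequence, Optional, Tuple
--
-- def _split_long_sequence(
--     input_ids: List[int],
--     labels: List[int],
--     loss_mask: List[int],
--     chunksize: int,
--     pad_token_id: int,
--     ignore_index: int,
-- ) -> List[Tuple[List[int], List[int], List[int]]]:
--     """
--     Split a long sequence (len > chunksize) into multiple chunks of exactly chunksize.
--     Labels and loss_mask are pre-shifted to next-token prediction format:
--       - Non-final chunks: labels[i] = original_labels[start+i+1], covering the chunk boundary.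
--       - Final chunk: last label is IGNORE (no next token to predict).
--     The last chunk is padded to chunksize if its length is shorter.
--     """
--     chunks = []
--     seq_len = len(input_ids)
--     num_chunks = (seq_len + chunksize - 1) // chunksize
--
--     for chunk_idx in range(num_chunks):
--         start = chunk_idx * chunksize
--         end = min(start + chunksize, seq_len)
--         is_final_chunk = (chunk_idx == num_chunks - 1)
--
--         chunk_input_ids = input_ids[start:end]
--
--         # Pre-shift labels and loss_mask for next-token prediction
--         if not is_final_chunk:
--             # Non-final chunk: shift by 1, end+1 naturally includes the boundary token
--             chunk_labels = labels[start + 1 : end + 1]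
--             chunk_loss_mask = loss_mask[start + 1 : end + 1]
--         else:
--             # Final chunk: shift by 1, append IGNORE/0 at the end
--             chunk_labels = labels[start + 1 : end] + [ignore_index]
--             chunk_loss_mask = loss_mask[start + 1 : end] + [0]
--
--         # Pad the last chunk if needed
--         padding_len = chunksize - len(chunk_input_ids)
--         if padding_len > 0:
--             chunk_input_ids = chunk_input_ids + [pad_token_id] * padding_len
--             chunk_labels = chunk_labels + [ignore_index] * padding_len
--             chunk_loss_mask = chunk_loss_mask + [0] * padding_len
--
--         chunks.append((chunk_input_ids, chunk_labels, chunk_loss_mask))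
--
--     return chunks
-- ===== SOURCE B (Python) =====
-- from typing import List, Tuple
--
-- def _split_long_sequence(
--     input_ids: List[int],
--     labels: List[int],
--     loss_mask: List[int],
--     chunksize: int,
--     pad_token_id: int,
--     ignore_index: int,
-- ) -> List[Tuple[List[int], List[int], List[int]]]:
--     # Streaming builder: walk the tokens once, appending each token together with
--     # its next-token label/loss-mask to a current chunk, flushing whenever the
--     # chunk is full; pad whatever is left at the end.  No slicing, no chunk
--     # arithmetic, no final-chunk branch.
--     n = len(input_ids)
--     chunks = []
--     cur_ids, cur_lab, cur_lm = [], [], []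
--     for i, tok in enumerate(input_ids):
--         cur_ids.append(tok)
--         cur_lab.append(labels[i + 1] if i + 1 < n else ignore_index)
--         cur_lm.append(loss_mask[i + 1] if i + 1 < n else 0)
--         if len(cur_ids) == chunksize:
--             chunks.append((cur_ids, cur_lab, cur_lm))
--             cur_ids, cur_lab, cur_lm = [], [], []
--     if cur_ids:
--         pad = chunksize - len(cur_ids)
--         chunks.append((cur_ids + [pad_token_id] * pad,
--                        cur_lab + [ignore_index] * pad,
--                        cur_lm + [0] * pad))
--     return chunks
-- ===== Notes on version B (the rewrite author's own statement) =====
-- stated objective: alternative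
-- what changed: B replaces A's chunk-index arithmetic and per-chunk slicing (num_chunks, start/end, final-chunk branch) by a single streaming pass: each token is appended together with its next-token label/loss-mask to a current-chunk accumulator that is flushed whenever it reaches chunksize, and the leftover is padded once at the end.
-- outside the precondition, e.g. on _split_long_sequence([1], [5], [1], -1, 0, -100): A returns [([], [-100], [0])], B returns [([1], [-100], [0])]
import Mathlib
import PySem

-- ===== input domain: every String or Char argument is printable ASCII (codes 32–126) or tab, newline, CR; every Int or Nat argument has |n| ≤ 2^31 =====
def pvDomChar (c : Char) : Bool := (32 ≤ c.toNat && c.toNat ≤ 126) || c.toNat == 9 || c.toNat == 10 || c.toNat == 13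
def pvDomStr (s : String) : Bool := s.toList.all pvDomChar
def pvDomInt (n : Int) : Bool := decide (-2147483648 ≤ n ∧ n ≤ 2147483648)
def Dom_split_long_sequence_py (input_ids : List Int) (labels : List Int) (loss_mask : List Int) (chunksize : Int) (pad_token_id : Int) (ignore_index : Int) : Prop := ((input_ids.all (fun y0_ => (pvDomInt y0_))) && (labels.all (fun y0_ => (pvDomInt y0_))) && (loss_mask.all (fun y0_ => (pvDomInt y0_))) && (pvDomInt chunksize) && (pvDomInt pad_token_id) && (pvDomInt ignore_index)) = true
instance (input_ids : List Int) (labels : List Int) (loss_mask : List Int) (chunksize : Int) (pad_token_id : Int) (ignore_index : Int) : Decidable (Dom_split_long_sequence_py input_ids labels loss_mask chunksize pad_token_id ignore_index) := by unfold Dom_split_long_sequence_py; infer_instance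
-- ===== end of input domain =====

-- B replaces A's index arithmetic and slicing by a single streaming pass: each token is
-- appended (with its next-token label/loss-mask) to a current chunk that is flushed when
-- full, and the leftover is padded at the end (objective: alternative; return value only).

-- ===== PORT A =====
-- Loop body of A (one chunk), lifted out as a named helper; `num_chunks` is passed in.
def pvChunkA (input_ids : List Int) (labels : List Int) (loss_mask : List Int)
    (chunksize : Int) (pad_token_id : Int) (ignore_index : Int) (num_chunks : Int)
    (chunk_idx : Int) : List Int × List Int × List Int :=
  let seq_len : Int := (input_ids.length : Int)
  let start := chunk_idx * chunksize
  let stop := min (start + chunksize) seq_len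
  let chunk_input_ids := PySem.List.slice input_ids (some start) (some stop)
  let chunk_labels :=
    if chunk_idx ≠ num_chunks - 1 then
      PySem.List.slice labels (some (start + 1)) (some (stop + 1))
    else
      PySem.List.slice labels (some (start + 1)) (some stop) ++ [ignore_index]
  let chunk_loss_mask :=
    if chunk_idx ≠ num_chunks - 1 then
      PySem.List.slice loss_mask (some (start + 1)) (some (stop + 1))
    else
      PySem.List.slice loss_mask (some (start + 1)) (some stop) ++ [(0 : Int)]
  let padding_len := chunksize - (chunk_input_ids.length : Int)
  if 0 < padding_len then
    (chunk_input_ids ++ PySem.List.pyRepeat [pad_token_id] padding_len,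
     chunk_labels ++ PySem.List.pyRepeat [ignore_index] padding_len,
     chunk_loss_mask ++ PySem.List.pyRepeat [(0 : Int)] padding_len)
  else
    (chunk_input_ids, chunk_labels, chunk_loss_mask)

def split_long_sequence_py (input_ids : List Int) (labels : List Int) (loss_mask : List Int) (chunksize : Int) (pad_token_id : Int) (ignore_index : Int) : List (List Int × List Int × List Int) :=
  let seq_len : Int := (input_ids.length : Int)
  let num_chunks := PySem.Int.floordiv (seq_len + chunksize - 1) chunksize
  (PySem.List.pyRange 0 num_chunks 1).foldl
    (fun chunks chunk_idx =>
      chunks ++ [pvChunkA input_ids labels loss_mask chunksize pad_token_id ignore_index num_chunks chunk_idx])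
    []

-- ===== PORT B =====
-- Loop body of B (one token): append `tok` and its next-token label/loss-mask to the
-- current chunk, flush the chunk once it reaches chunksize; state = (chunks, cur triple).
def pvStepB (labels : List Int) (loss_mask : List Int) (n : Int) (chunksize : Int) (ignore_index : Int)
    (st : List (List Int × List Int × List Int) × List Int × List Int × List Int)
    (p : Int × Int) : List (List Int × List Int × List Int) × List Int × List Int × List Int :=
  let cur_ids := st.2.1 ++ [p.2]
  let cur_lab := st.2.2.1 ++ [if p.1 + 1 < n then PySem.List.pyGetD labels (p.1 + 1) 0 else ignore_index]
  let cur_lm  := st.2.2.2 ++ [if p.1 + 1 < n then PySem.List.pyGetD loss_mask (p.1 + 1) 0 else 0]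
  if (cur_ids.length : Int) = chunksize then (st.1 ++ [(cur_ids, cur_lab, cur_lm)], [], [], [])
  else (st.1, cur_ids, cur_lab, cur_lm)

-- After the loop: pad and append the leftover chunk, if any.
def pvFinishB (chunksize : Int) (pad_token_id : Int) (ignore_index : Int)
    (st : List (List Int × List Int × List Int) × List Int × List Int × List Int) :
    List (List Int × List Int × List Int) :=
  if st.2.1 ≠ [] then
    let pad := chunksize - (st.2.1.length : Int)
    st.1 ++ [(st.2.1 ++ PySem.List.pyRepeat [pad_token_id] pad,
              st.2.2.1 ++ PySem.List.pyRepeat [ignore_index] pad,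
              st.2.2.2 ++ PySem.List.pyRepeat [(0 : Int)] pad)]
  else st.1

def split_long_sequence_py_alt (input_ids : List Int) (labels : List Int) (loss_mask : List Int) (chunksize : Int) (pad_token_id : Int) (ignore_index : Int) : List (List Int × List Int × List Int) :=
  let n : Int := (input_ids.length : Int)
  pvFinishB chunksize pad_token_id ignore_index
    ((PySem.List.enumerate input_ids).foldl
      (pvStepB labels loss_mask n chunksize ignore_index) ([], [], [], []))

-- ===== PRECONDITION & SPEC =====
-- Pre_ excludes chunksize ≤ 0 (chunksize = 0 raises ZeroDivisionError in A; a negative chunksize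
-- yields accidental empty/negative-slice artefacts) and, for a nonempty input_ids, label/loss-mask
-- lists whose length differs from input_ids (on which A's independently truncated slices are an
-- accident of its implementation and B's per-index lookup raises IndexError when they are shorter).
def Pre_split_long_sequence_py (input_ids : List Int) (labels : List Int) (loss_mask : List Int) (chunksize : Int) (pad_token_id : Int) (ignore_index : Int) : Prop :=
  1 ≤ chunksize ∧ (input_ids = [] ∨ (labels.length = input_ids.length ∧ loss_mask.length = input_ids.length))
instance (input_ids : List Int) (labels : List Int) (loss_mask : List Int) (chunksize : Int) (pad_token_id : Int) (ignore_index : Int) : Decidable (Pre_split_long_sequence_py input_ids labels loss_mask chunksize pad_token_id ignore_index) := by unfold Pre_split_long_sequence_py; infer_instance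

def pvWitness_split_long_sequence_py : List Int × List Int × List Int × Int × Int × Int :=
  ([1, 2, 3, 4, 5], [10, 20, 30, 40, 50], [1, 1, 0, 1, 1], 2, 0, -100)

def Spec_split_long_sequence_py (input_ids : List Int) (labels : List Int) (loss_mask : List Int) (chunksize : Int) (pad_token_id : Int) (ignore_index : Int) (out : List (List Int × List Int × List Int)) : Prop := out = split_long_sequence_py_alt input_ids labels loss_mask chunksize pad_token_id ignore_index
instance (input_ids : List Int) (labels : List Int) (loss_mask : List Int) (chunksize : Int) (pad_token_id : Int) (ignore_index : Int) (out : List (List Int × List Int × List Int)) : Decidable (Spec_split_long_sequence_py input_ids labels loss_mask chunksize pad_token_id ignore_index out) := by unfold Spec_split_long_sequence_py; infer_instance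

-- ===== CLAIM (what is proved, stated in full; the proofs are below) =====
def Claim_equal_split_long_sequence_py : Prop := ∀ (input_ids : List Int) (labels : List Int) (loss_mask : List Int) (chunksize : Int) (pad_token_id : Int) (ignore_index : Int), Dom_split_long_sequence_py input_ids labels loss_mask chunksize pad_token_id ignore_index → Pre_split_long_sequence_py input_ids labels loss_mask chunksize pad_token_id ignore_index → Spec_split_long_sequence_py input_ids labels loss_mask chunksize pad_token_id ignore_index (split_long_sequence_py input_ids labels loss_mask chunksize pad_token_id ignore_index)

-- ===== LEMMAS AND PROOFS =====

-- Proof-side intermediate form: one uniform slice-and-pad per chunk start, over the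
-- once-shifted label/loss-mask tables.  A is reduced to it chunk-by-chunk, and B's
-- streaming fold is reduced to it by a chunk-peeling induction.
def pvChunkB (input_ids : List Int) (shifted_labels : List Int) (shifted_loss_mask : List Int)
    (chunksize : Int) (pad_token_id : Int) (ignore_index : Int)
    (start : Int) : List Int × List Int × List Int :=
  let ids := PySem.List.slice input_ids (some start) (some (start + chunksize))
  let pad := chunksize - (ids.length : Int)
  (ids ++ PySem.List.pyRepeat [pad_token_id] pad,
   PySem.List.slice shifted_labels (some start) (some (start + chunksize)) ++ PySem.List.pyRepeat [ignore_index] pad,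
   PySem.List.slice shifted_loss_mask (some start) (some (start + chunksize)) ++ PySem.List.pyRepeat [(0 : Int)] pad)

def pvUniform (input_ids : List Int) (labels : List Int) (loss_mask : List Int) (chunksize : Int) (pad_token_id : Int) (ignore_index : Int) : List (List Int × List Int × List Int) :=
  let shifted_labels := labels.tail ++ [ignore_index]
  let shifted_loss_mask := loss_mask.tail ++ [(0 : Int)]
  (PySem.List.pyRange 0 (input_ids.length : Int) chunksize).foldl
    (fun chunks start =>
      chunks ++ [pvChunkB input_ids shifted_labels shifted_loss_mask chunksize pad_token_id ignore_index start])
    []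

-- Both shifted-table slices agree with A's "+1"-shifted slices: non-final chunk.
theorem shift_slice_nonfinal (l : List Int) (x : Int) (st cs : Int)
    (hst : 0 ≤ st) (hcs : 0 ≤ cs) (hend : st + cs + 1 ≤ (l.length : Int)) :
    PySem.List.slice l (some (st + 1)) (some (st + cs + 1)) =
    PySem.List.slice (l.tail ++ [x]) (some st) (some (st + cs)) := by
  rw [PySem.List.slice_toNat l (by omega) (by omega),
      PySem.List.slice_toNat (l.tail ++ [x]) (by omega) (by omega)]
  have hlen : st.toNat + cs.toNat + 1 ≤ l.length := by omega
  have e1 : (st + 1).toNat = st.toNat + 1 := by omega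
  have e2 : (st + cs + 1).toNat = st.toNat + cs.toNat + 1 := by omega
  have e3 : (st + cs).toNat = st.toNat + cs.toNat := by omega
  rw [e1, e2, e3]
  rw [List.drop_append_of_le_length (by rw [List.length_tail]; omega)]
  rw [← List.drop_one, List.drop_drop]
  rw [List.take_append_of_le_length (by rw [List.length_drop]; omega)]
  have e4 : st.toNat + cs.toNat + 1 - (st.toNat + 1) = cs.toNat := by omega
  have e5 : st.toNat + cs.toNat - st.toNat = cs.toNat := by omega
  have e6 : 1 + st.toNat = st.toNat + 1 := by omega
  rw [e4, e5, e6]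

-- Both shifted-table slices agree with A's "append the sentinel" form: final chunk.
theorem shift_slice_final (l : List Int) (x : Int) (st cs n : Int)
    (hst : 0 ≤ st) (hcs : 0 ≤ cs) (hln : (l.length : Int) = n) (hlt : st < n) (hge : n ≤ st + cs) :
    PySem.List.slice l (some (st + 1)) (some n) ++ [x] =
    PySem.List.slice (l.tail ++ [x]) (some st) (some (st + cs)) := by
  subst hln
  rw [PySem.List.slice_toNat l (by omega) (by omega),
      PySem.List.slice_toNat (l.tail ++ [x]) (by omega) (by omega)]
  have e1 : (st + 1).toNat = st.toNat + 1 := by omega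
  have e2 : ((l.length : Int)).toNat = l.length := by omega
  rw [e1, e2]
  rw [List.drop_append_of_le_length (by rw [List.length_tail]; omega)]
  rw [← List.drop_one, List.drop_drop]
  have e6 : 1 + st.toNat = st.toNat + 1 := by omega
  rw [e6]
  rw [List.take_of_length_le (by rw [List.length_drop])]
  rw [List.take_of_length_le
    (by rw [List.length_append, List.length_drop, List.length_cons, List.length_nil]; omega)]

-- The per-chunk bodies agree (chunk index k, chunk start chunksize * k).
theorem chunk_eq (input_ids labels loss_mask : List Int) (chunksize pad_token_id ignore_index num : Int)
    (hcs : 1 <= chunksize)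
    (hl : labels.length = input_ids.length) (hm : loss_mask.length = input_ids.length)
    (hnum : num = PySem.Int.floordiv ((input_ids.length : Int) + chunksize - 1) chunksize)
    (k : Int) (hk0 : 0 <= k) (hk : k < num) :
    pvChunkA input_ids labels loss_mask chunksize pad_token_id ignore_index num k =
    pvChunkB input_ids (labels.tail ++ [ignore_index]) (loss_mask.tail ++ [(0 : Int)])
      chunksize pad_token_id ignore_index (chunksize * k) := by
  have hcs0 : (0 : Int) < chunksize := by omega
  obtain ⟨hlo, hhi⟩ := (PySem.Int.floordiv_eq_iff_of_pos hcs0).mp hnum.symm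
  set N : Int := (input_ids.length : Int) with hN
  have hNnn : 0 ≤ N := by positivity
  have hstnn : 0 ≤ k * chunksize := mul_nonneg hk0 (by omega)
  have hkm : k * chunksize ≤ (num - 1) * chunksize :=
    mul_le_mul_of_nonneg_right (by omega) (by omega)
  have hstN : k * chunksize < N := by nlinarith
  have hNub : N ≤ num * chunksize := by nlinarith
  simp only [pvChunkA, pvChunkB, mul_comm chunksize k]
  by_cases hfin : k = num - 1
  · -- final chunk
    have hmin : min (k * chunksize + chunksize) N = N := min_eq_right (by nlinarith)
    rw [hmin, if_neg (show ¬(k ≠ num - 1) from fun h => h hfin),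
        if_neg (show ¬(k ≠ num - 1) from fun h => h hfin)]
    have hids : PySem.List.slice input_ids (some (k * chunksize)) (some N) =
        PySem.List.slice input_ids (some (k * chunksize)) (some (k * chunksize + chunksize)) := by
      rw [PySem.List.slice_toNat input_ids (by omega) (by omega),
          PySem.List.slice_toNat input_ids (by omega) (by omega)]
      rw [List.take_of_length_le (by rw [List.length_drop]; omega),
          List.take_of_length_le (by rw [List.length_drop]; omega)]
    rw [hids,
        shift_slice_final labels ignore_index (k * chunksize) chunksize N (by omega) (by omega)
          (by omega) (by omega) (by omega),
        shift_slice_final loss_mask 0 (k * chunksize) chunksize N (by omega) (by omega)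
          (by omega) (by omega) (by omega)]
    split_ifs with hpad
    · rfl
    · have hz : (chunksize - ((PySem.List.slice input_ids (some (k * chunksize))
          (some (k * chunksize + chunksize))).length : Int)).toNat = 0 := by omega
      simp [PySem.List.pyRepeat_singleton, hz]
  · -- non-final chunk
    have hk1 : k + 1 ≤ num - 1 := by omega
    have hub : (k + 1) * chunksize ≤ (num - 1) * chunksize :=
      mul_le_mul_of_nonneg_right hk1 (by omega)
    have hendN : k * chunksize + chunksize + 1 ≤ N := by nlinarith
    have hmin : min (k * chunksize + chunksize) N = k * chunksize + chunksize :=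
      min_eq_left (by omega)
    rw [hmin, if_pos hfin, if_pos hfin]
    have hpad : chunksize - ((PySem.List.slice input_ids (some (k * chunksize))
        (some (k * chunksize + chunksize))).length : Int) = 0 := by
      rw [PySem.List.slice_toNat input_ids (by omega) (by omega)]
      rw [List.length_take, List.length_drop]
      omega
    rw [hpad]
    rw [shift_slice_nonfinal labels ignore_index (k * chunksize) chunksize (by omega) (by omega)
          (by omega),
        shift_slice_nonfinal loss_mask 0 (k * chunksize) chunksize (by omega) (by omega)
          (by omega)]
    simp [PySem.List.pyRepeat_singleton]

-- A equals the uniform slice-and-pad form (proof adapted from the per-chunk lemma).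
theorem a_eq_uniform (input_ids labels loss_mask : List Int) (chunksize pad_token_id ignore_index : Int)
    (hcs : 1 ≤ chunksize)
    (hl : labels.length = input_ids.length) (hm : loss_mask.length = input_ids.length) :
    split_long_sequence_py input_ids labels loss_mask chunksize pad_token_id ignore_index =
    pvUniform input_ids labels loss_mask chunksize pad_token_id ignore_index := by
  have hcs0 : (0 : Int) < chunksize := by omega
  unfold split_long_sequence_py pvUniform
  simp only [PySem.List.foldl_append_singleton_eq_map, List.nil_append]
  rw [PySem.List.pyRange_one, PySem.List.pyRange_of_pos 0 (input_ids.length : Int) hcs0]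
  rw [List.map_map, List.map_map]
  set num : Int := PySem.Int.floordiv ((input_ids.length : Int) + chunksize - 1) chunksize with hnum
  have hK : (if (0 : Int) < (input_ids.length : Int)
      then (((input_ids.length : Int) - 0 + chunksize - 1) / chunksize).toNat else 0) =
      (num - 0).toNat := by
    rw [hnum, PySem.Int.floordiv_eq_ediv_of_pos hcs0]
    by_cases h : (0 : Int) < (input_ids.length : Int)
    · rw [if_pos h]; ring_nf
    · rw [if_neg h]
      have hz : (input_ids.length : Int) = 0 := by omega
      rw [hz]
      have : (0 + chunksize - 1) / chunksize = 0 :=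
        Int.ediv_eq_zero_of_lt (by omega) (by omega)
      rw [this]
      rfl
  rw [hK]
  refine List.map_congr_left ?_
  intro a ha
  rw [List.mem_range] at ha
  simp only [Function.comp_apply, zero_add]
  exact chunk_eq input_ids labels loss_mask chunksize pad_token_id ignore_index num hcs hl hm
    hnum (a : Int) (by positivity) (by omega)

-- ---- B side: streaming fold = uniform slice-and-pad ----

-- Generic streaming step over a pre-zipped triple list.
def pvStepZ (c : Int) (st : List (List Int × List Int × List Int) × List Int × List Int × List Int)
    (q : Int × Int × Int) : List (List Int × List Int × List Int) × List Int × List Int × List Int :=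
  let ci := st.2.1 ++ [q.1]
  let cl := st.2.2.1 ++ [q.2.1]
  let cm := st.2.2.2 ++ [q.2.2]
  if (ci.length : Int) = c then (st.1 ++ [(ci, cl, cm)], [], [], []) else (st.1, ci, cl, cm)

-- One padded chunk, cut directly from the zipped list.
def pvMkChunk (c' : Nat) (pad_token_id ignore_index : Int) (z : List (Int × Int × Int)) (k : Nat) :
    List Int × List Int × List Int :=
  let seg := (z.drop (k * c')).take c'
  (seg.map (·.1) ++ List.replicate (c' - seg.length) pad_token_id,
   seg.map (·.2.1) ++ List.replicate (c' - seg.length) ignore_index,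
   seg.map (·.2.2) ++ List.replicate (c' - seg.length) 0)

-- B's enumerate fold is the zip fold (the positional lookups read the shifted tables).
theorem bridge_fold (input_ids labels loss_mask : List Int) (chunksize ignore_index : Int)
    (hl : labels.length = input_ids.length) (hm : loss_mask.length = input_ids.length) :
    ∀ (k : Nat) (acc : List (List Int × List Int × List Int) × List Int × List Int × List Int),
      k ≤ input_ids.length →
      (PySem.List.enumerate (input_ids.drop k) (k : Int)).foldl
          (pvStepB labels loss_mask (input_ids.length : Int) chunksize ignore_index) acc =
      ((input_ids.drop k).zip
          (((labels.tail ++ [ignore_index]).drop k).zip ((loss_mask.tail ++ [(0 : Int)]).drop k))).foldl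
          (pvStepZ chunksize) acc := by
  intro k
  induction hn : input_ids.length - k generalizing k with
  | zero =>
    intro acc hk
    have hk' : k = input_ids.length := by omega
    rw [List.drop_of_length_le (by omega)]
    simp [PySem.List.enumerate]
  | succ m ih =>
    intro acc hk
    have hklt : k < input_ids.length := by omega
    have hLlen : (labels.tail ++ [ignore_index]).length = input_ids.length := by
      simp [List.length_tail]; omega
    have hMlen : (loss_mask.tail ++ [(0 : Int)]).length = input_ids.length := by
      simp [List.length_tail]; omega
    rw [List.drop_eq_getElem_cons hklt,
        List.drop_eq_getElem_cons (show k < (labels.tail ++ [ignore_index]).length by omega),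
        List.drop_eq_getElem_cons (show k < (loss_mask.tail ++ [(0 : Int)]).length by omega),
        PySem.List.enumerate_cons, List.zip_cons_cons, List.zip_cons_cons,
        List.foldl_cons, List.foldl_cons]
    have hstep :
        pvStepB labels loss_mask (input_ids.length : Int) chunksize ignore_index acc
          ((k : Int), input_ids[k]) =
        pvStepZ chunksize acc
          (input_ids[k], (labels.tail ++ [ignore_index])[k], (loss_mask.tail ++ [(0 : Int)])[k]) := by
      have hlab : (if (k : Int) + 1 < (input_ids.length : Int)
            then PySem.List.pyGetD labels ((k : Int) + 1) 0 else ignore_index) =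
          (labels.tail ++ [ignore_index])[k]'(by omega) := by
        by_cases hke : k + 1 < input_ids.length
        · rw [if_pos (by exact_mod_cast hke)]
          have hkl : k < labels.tail.length := by simp [List.length_tail]; omega
          rw [List.getElem_append_left hkl]
          have : ((k : Int) + 1) = ((k + 1 : Nat) : Int) := by push_cast; ring
          rw [this, PySem.List.pyGetD_natCast]
          rw [List.getElem_tail]
          rw [List.getD_eq_getElem labels 0 (by omega)]
        · rw [if_neg (by exact_mod_cast hke)]
          have hkl : k = labels.tail.length := by simp [List.length_tail]; omega
          rw [List.getElem_append_right (by omega)]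
          simp [hkl]
      have hlm : (if (k : Int) + 1 < (input_ids.length : Int)
            then PySem.List.pyGetD loss_mask ((k : Int) + 1) 0 else (0 : Int)) =
          (loss_mask.tail ++ [(0 : Int)])[k]'(by omega) := by
        by_cases hke : k + 1 < input_ids.length
        · rw [if_pos (by exact_mod_cast hke)]
          have hkl : k < loss_mask.tail.length := by simp [List.length_tail]; omega
          rw [List.getElem_append_left hkl]
          have : ((k : Int) + 1) = ((k + 1 : Nat) : Int) := by push_cast; ring
          rw [this, PySem.List.pyGetD_natCast]
          rw [List.getElem_tail]
          rw [List.getD_eq_getElem loss_mask 0 (by omega)]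
        · rw [if_neg (by exact_mod_cast hke)]
          have hkl : k = loss_mask.tail.length := by simp [List.length_tail]; omega
          rw [List.getElem_append_right (by omega)]
          simp [hkl]
      simp only [pvStepB, pvStepZ, hlab, hlm]
    rw [hstep]
    have : ((k : Int) + 1) = (((k + 1 : Nat)) : Int) := by push_cast; ring
    rw [this]
    exact ih (k + 1) (by omega) _ (by omega)

-- No flush happens while the current chunk stays short.
theorem fold_partial (c : Int) :
    ∀ (z : List (Int × Int × Int)) (done : List (List Int × List Int × List Int))
      (ci cl cm : List Int),
      ((ci.length : Int) + z.length < c) →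
      z.foldl (pvStepZ c) (done, ci, cl, cm) =
      (done, ci ++ z.map (·.1), cl ++ z.map (·.2.1), cm ++ z.map (·.2.2)) := by
  intro z
  induction z with
  | nil => intro done ci cl cm _; simp
  | cons q zs ih =>
    intro done ci cl cm h
    simp only [List.foldl_cons, pvStepZ]
    rw [if_neg (by simp at h ⊢; omega)]
    rw [ih done _ _ _ (by simp at h ⊢; omega)]
    simp

-- Exactly one flush happens when the elements left complete the chunk.
theorem fold_flush (c : Int) :
    ∀ (z : List (Int × Int × Int)) (done : List (List Int × List Int × List Int))
      (ci cl cm : List Int),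
      ((ci.length : Int) < c) → ((ci.length : Int) + z.length = c) →
      z.foldl (pvStepZ c) (done, ci, cl, cm) =
      (done ++ [(ci ++ z.map (·.1), cl ++ z.map (·.2.1), cm ++ z.map (·.2.2))], [], [], []) := by
  intro z
  induction z with
  | nil => intro done ci cl cm hlt heq; simp at heq; omega
  | cons q zs ih =>
    intro done ci cl cm hlt heq
    simp only [List.foldl_cons, pvStepZ]
    have hlen1 : ((ci ++ [q.1]).length : Int) = (ci.length : Int) + 1 := by simp
    have hsum : (ci.length : Int) + ((zs.length : Int) + 1) = c := by
      simpa using heq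
    by_cases hfull : ((ci ++ [q.1]).length : Int) = c
    · have hzs : zs = [] := by
        have h1 : (ci.length : Int) + 1 = c := by rw [hlen1] at hfull; exact hfull
        have : zs.length = 0 := by omega
        exact List.eq_nil_of_length_eq_zero this
      subst hzs
      rw [if_pos hfull]
      simp
    · have hne : (ci.length : Int) + 1 ≠ c := by rw [hlen1] at hfull; exact hfull
      rw [if_neg hfull]
      rw [ih done _ _ _ (by rw [hlen1]; omega) (by rw [hlen1]; push_cast; omega)]
      simp

-- Chunk-peeling induction: fold + final padding = the list of padded chunks.
theorem fold_chunks (c pad_token_id ignore_index : Int) (hc : 1 ≤ c) :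
    ∀ (m : Nat) (z : List (Int × Int × Int)), z.length = m →
      ∀ (done : List (List Int × List Int × List Int)),
      pvFinishB c pad_token_id ignore_index (z.foldl (pvStepZ c) (done, [], [], [])) =
      done ++ (List.range ((m + c.toNat - 1) / c.toNat)).map (pvMkChunk c.toNat pad_token_id ignore_index z) := by
  have hc' : 1 ≤ c.toNat := by omega
  intro m
  induction m using Nat.strong_induction_on with
  | _ m ih =>
    intro z hz done
    by_cases hm0 : m = 0
    · subst hm0
      have : z = [] := List.eq_nil_of_length_eq_zero hz
      subst this
      have : (0 + c.toNat - 1) / c.toNat = 0 := Nat.div_eq_of_lt (by omega)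
      rw [this]
      simp [pvFinishB]
    · by_cases hsmall : m < c.toNat
      · rw [fold_partial c z done [] [] [] (by simp; omega)]
        have hone : (m + c.toNat - 1) / c.toNat = 1 :=
          Nat.div_eq_of_lt_le (by omega) (by omega)
        rw [hone]
        have hnz : z.map (·.1) ≠ [] := by
          intro h
          have := congrArg List.length h
          simp [hz] at this; omega
        simp only [pvFinishB, List.nil_append]
        rw [if_pos (by simpa using hnz)]
        simp only [List.range_one, List.map_cons, List.map_nil, pvMkChunk]
        have hseg : (z.drop (0 * c.toNat)).take c.toNat = z := by
          simp [List.take_of_length_le, hz, Nat.le_of_lt hsmall]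
        rw [hseg]
        have hlen : ((z.map (·.1)).length : Int) = (m : Int) := by simp [hz]
        have hrep : ∀ x : Int, PySem.List.pyRepeat [x] (c - ((z.map (·.1)).length : Int)) =
            List.replicate (c.toNat - z.length) x := by
          intro x
          rw [PySem.List.pyRepeat_singleton]
          congr 1
          simp only [List.length_map, hz]
          omega
        simp [hz]
      · -- a full chunk is available: peel it
        rw [Nat.not_lt] at hsmall
        have hsplit : z = z.take c.toNat ++ z.drop c.toNat := (List.take_append_drop _ _).symm
        rw [hsplit, List.foldl_append]
        rw [fold_flush c (z.take c.toNat) done [] [] [] (by simp; omega)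
            (by simp [List.length_take, hz]; omega)]
        rw [ih (m - c.toNat) (by omega) (z.drop c.toNat) (by simp [hz]) _]
        have hK : (m + c.toNat - 1) / c.toNat = (m - c.toNat + c.toNat - 1) / c.toNat + 1 := by
          have h1 : m + c.toNat - 1 = (m - c.toNat + c.toNat - 1) + c.toNat := by omega
          rw [h1, Nat.add_div_right _ (by omega)]
        rw [hK, List.range_succ_eq_map, List.map_cons, List.map_map]
        have hchunk0 : pvMkChunk c.toNat pad_token_id ignore_index (z.take c.toNat ++ z.drop c.toNat) 0 =
            ([] ++ (z.take c.toNat).map (·.1), [] ++ (z.take c.toNat).map (·.2.1),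
             [] ++ (z.take c.toNat).map (·.2.2)) := by
          simp only [pvMkChunk, List.take_append_drop, Nat.zero_mul, List.drop_zero]
          have hlen : (z.take c.toNat).length = c.toNat := by simp [hz]; omega
          simp [hlen]
        have hrest : ∀ k : Nat,
            pvMkChunk c.toNat pad_token_id ignore_index (z.take c.toNat ++ z.drop c.toNat) (Nat.succ k) =
            pvMkChunk c.toNat pad_token_id ignore_index (z.drop c.toNat) k := by
          intro k
          simp only [pvMkChunk, List.take_append_drop]
          rw [show Nat.succ k * c.toNat = c.toNat + k * c.toNat by
                rw [Nat.succ_mul]; omega,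
              show c.toNat + k * c.toNat = c.toNat + k * c.toNat from rfl,
              ← List.drop_drop]
        rw [hchunk0]
        simp only [Function.comp_def, hrest]
        simp
-- The zip's chunks are the uniform slices of the three tables (index k, start c*k).
theorem mkchunk_eq_chunkB (input_ids L M : List Int) (c' : Nat) (pad_token_id ignore_index : Int)
    (hL : L.length = input_ids.length) (hM : M.length = input_ids.length) (k : Nat) :
    pvMkChunk c' pad_token_id ignore_index (input_ids.zip (L.zip M)) k =
    pvChunkB input_ids L M (c' : Int) pad_token_id ignore_index ((c' : Int) * k) := by
  have hzlen : (input_ids.zip (L.zip M)).length = input_ids.length := by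
    simp [hL, hM]
  have h1 : (input_ids.zip (L.zip M)).map (·.1) = input_ids := by
    simp [List.map_fst_zip, hL, hM]
  have hsz := List.map_snd_zip (l₁ := input_ids) (l₂ := L.zip M) (by simp [hL, hM])
  have h2 : (input_ids.zip (L.zip M)).map (·.2.1) = L := by
    rw [show (fun x : Int × Int × Int => x.2.1) = (Prod.fst ∘ Prod.snd) from rfl,
        ← List.map_map, hsz]
    simp [List.map_fst_zip, hM, hL]
  have h3 : (input_ids.zip (L.zip M)).map (·.2.2) = M := by
    rw [show (fun x : Int × Int × Int => x.2.2) = (Prod.snd ∘ Prod.snd) from rfl,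
        ← List.map_map, hsz]
    simp [List.map_snd_zip, hM, hL]
  have hcast : ((c' : Int) * (k : Int)) = ((c' * k : Nat) : Int) := by push_cast; ring
  unfold pvMkChunk pvChunkB
  simp only [hcast, PySem.List.slice_natCast_add]
  set seg := (((input_ids.zip (L.zip M))).drop (k * c')).take c' with hseg
  have hmapf : ∀ (f : Int × Int × Int → Int) (X : List Int),
      (input_ids.zip (L.zip M)).map f = X →
      seg.map f = (X.drop (c' * k)).take c' := by
    intro f X hX
    rw [hseg, List.map_take, List.map_drop, hX, Nat.mul_comm]
  have hsl : ((input_ids.drop (c' * k)).take c').length = seg.length := by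
    rw [hseg]
    simp [hzlen, Nat.mul_comm]
  have hlen_le : seg.length ≤ c' := by rw [hseg]; simp
  have hrep : ∀ x : Int, PySem.List.pyRepeat [x]
      ((c' : Int) - (((input_ids.drop (c' * k)).take c').length : Int)) =
      List.replicate (c' - seg.length) x := by
    intro x
    rw [PySem.List.pyRepeat_singleton, hsl]
    congr 1
    omega
  rw [hmapf _ input_ids h1, hmapf _ L h2, hmapf _ M h3]
  simp only [hrep]

-- B equals the uniform slice-and-pad form.
theorem b_eq_uniform (input_ids labels loss_mask : List Int) (chunksize pad_token_id ignore_index : Int)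
    (hcs : 1 ≤ chunksize)
    (hl : labels.length = input_ids.length) (hm : loss_mask.length = input_ids.length) :
    split_long_sequence_py_alt input_ids labels loss_mask chunksize pad_token_id ignore_index =
    pvUniform input_ids labels loss_mask chunksize pad_token_id ignore_index := by
  have hcs0 : (0 : Int) < chunksize := by omega
  by_cases hnil : input_ids = []
  · subst hnil
    unfold split_long_sequence_py_alt pvUniform pvFinishB
    simp [PySem.List.enumerate, PySem.List.pyRange_of_pos 0 0 hcs0]
  · have hn1 : 1 ≤ input_ids.length := by
      cases input_ids with
      | nil => exact absurd rfl hnil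
      | cons a l => simp
    set L := labels.tail ++ [ignore_index] with hLdef
    set M := loss_mask.tail ++ [(0 : Int)] with hMdef
    have hL : L.length = input_ids.length := by
      rw [hLdef]; simp [List.length_tail]; omega
    have hM : M.length = input_ids.length := by
      rw [hMdef]; simp [List.length_tail]; omega
    set z := input_ids.zip (L.zip M) with hzdef
    have hzlen : z.length = input_ids.length := by simp [hzdef, hL, hM]
    rw [show split_long_sequence_py_alt input_ids labels loss_mask chunksize pad_token_id
          ignore_index =
        pvFinishB chunksize pad_token_id ignore_index
          ((PySem.List.enumerate input_ids).foldl
            (pvStepB labels loss_mask (input_ids.length : Int) chunksize ignore_index)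
            ([], [], [], [])) from rfl]
    have hb := bridge_fold input_ids labels loss_mask chunksize ignore_index hl hm 0
      ([], [], [], []) (by omega)
    simp only [List.drop_zero, Nat.cast_zero] at hb
    rw [hb]
    rw [fold_chunks chunksize pad_token_id ignore_index hcs z.length z rfl []]
    unfold pvUniform
    simp only [PySem.List.foldl_append_singleton_eq_map, List.nil_append]
    rw [PySem.List.pyRange_of_pos 0 (input_ids.length : Int) hcs0, List.map_map]
    have hKcount : (if (0 : Int) < (input_ids.length : Int)
        then (((input_ids.length : Int) - 0 + chunksize - 1) / chunksize).toNat else 0) =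
        (z.length + chunksize.toNat - 1) / chunksize.toNat := by
      rw [if_pos (by exact_mod_cast hn1)]
      obtain ⟨c', hce⟩ : ∃ c'' : Nat, chunksize = (c'' : Int) := ⟨chunksize.toNat, by omega⟩
      subst hce
      have e1 : (input_ids.length : Int) - 0 + (c' : Int) - 1 =
          ((input_ids.length + c' - 1 : Nat) : Int) := by
        push_cast [Nat.cast_sub (by omega : 1 ≤ input_ids.length + c')]
        omega
      rw [e1]
      simp only [← Int.natCast_div, Int.toNat_natCast, hzlen]
    rw [hKcount]
    refine List.map_congr_left ?_
    intro a _
    simp only [Function.comp_apply, zero_add]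
    have := mkchunk_eq_chunkB input_ids L M chunksize.toNat pad_token_id ignore_index
      hL hM a
    have hc' : (chunksize.toNat : Int) = chunksize := by omega
    rw [hc'] at this
    rw [← hzdef] at this
    exact this

-- ===== VERDICT (by name: the statement is the Claim_ definition above) =====
theorem split_long_sequence_py_spec : Claim_equal_split_long_sequence_py := by
  intro input_ids labels loss_mask chunksize pad_token_id ignore_index hDom hPre
  obtain ⟨hcs, hPre⟩ := hPre
  have hcs0 : (0 : Int) < chunksize := by omega
  rcases hPre with hnil | ⟨hl, hm⟩
  · subst hnil
    unfold Spec_split_long_sequence_py split_long_sequence_py split_long_sequence_py_alt pvFinishB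
    have hz : PySem.Int.floordiv (0 + chunksize - 1) chunksize = 0 :=
      (PySem.Int.floordiv_eq_iff_of_pos hcs0).mpr (by constructor <;> omega)
    simp only [List.length_nil, Nat.cast_zero, hz]
    rw [PySem.List.pyRange_one_eq_nil (by omega)]
    simp [PySem.List.enumerate]
  · unfold Spec_split_long_sequence_py
    rw [a_eq_uniform input_ids labels loss_mask chunksize pad_token_id ignore_index hcs hl hm,
        b_eq_uniform input_ids labels loss_mask chunksize pad_token_id ignore_index hcs hl hm]
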